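-- pv_equiv track=rewrite | github.com/Lee-Dageon/CodingTest_BAEKJOON | PG17682.py | solution
-- ===== SOURCE A (Python) =====
-- def solution(dartResult):
--     answer = 0      #최종점수
--     score = 0      #현재 기회의 점수
--     current = 0     #현재 기회의 계산된 점수
--     previous = 0    #이전 기회의 계산된 점수
--
--     for c in dartResult:        # 문자 하나씩 검사
--         if '0'<=c<='9': # 점수는 0점~10점
--             if c == '0' and score == 1:
--                 score = 10
--             else:
--                 score = int(c)
--         elif c == 'S':
--             previous = current
--             current = score ** 1
--             answer += current
--         elif c == 'D':
--             previous = current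
--             current = score ** 2
--             answer += current
--             pass
--         elif c == 'T':
--             previous = current
--             current = score ** 3
--             answer += current
--             pass
--         elif c == '*':
--             answer -= (previous + current)
--             previous *= 2
--             current *= 2
--             answer += (previous + current)
--             pass
--         elif c == '#':
--             answer -= current
--             current *= -1
--             answer += current
--
--     return answer
-- ===== SOURCE B (Python) =====
-- def solution(dartResult):
--     rounds = []     # per-throw scores (after bonuses/options)
--     score = 0       # digits parsed for the current throw
--
--     for c in dartResult:
--         if '0' <= c <= '9':
--             if c == '0' and score == 1:
--                 score = 10
--             else:
--                 score = int(c)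
--         elif c == 'S':
--             rounds.append(score ** 1)
--         elif c == 'D':
--             rounds.append(score ** 2)
--         elif c == 'T':
--             rounds.append(score ** 3)
--         elif c == '*':
--             if rounds:
--                 rounds[-1] *= 2
--             if len(rounds) >= 2:
--                 rounds[-2] *= 2
--         elif c == '#':
--             if rounds:
--                 rounds[-1] *= -1
--
--     return sum(rounds)
-- ===== Notes on version B (the rewrite author's own statement) =====
-- stated objective: alternative
-- what changed: Replaces A's incremental answer/current/previous scalar bookkeeping with a list of per-throw scores whose last one or two entries are updated in place by the option characters, summed once at the end.
import Mathlib
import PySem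

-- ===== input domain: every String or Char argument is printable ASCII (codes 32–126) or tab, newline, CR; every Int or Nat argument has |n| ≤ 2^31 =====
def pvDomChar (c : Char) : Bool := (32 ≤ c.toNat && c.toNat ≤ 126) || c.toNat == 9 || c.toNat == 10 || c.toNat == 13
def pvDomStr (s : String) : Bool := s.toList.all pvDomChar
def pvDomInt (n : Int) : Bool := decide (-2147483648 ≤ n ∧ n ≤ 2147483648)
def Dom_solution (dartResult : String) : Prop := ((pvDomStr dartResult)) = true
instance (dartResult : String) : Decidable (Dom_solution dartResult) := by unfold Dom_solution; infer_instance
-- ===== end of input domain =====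

-- B replaces A's incremental answer/current/previous bookkeeping by a list of per-throw
-- scores mutated at its tail and summed once at the end (objective: alternative decomposition).

-- ===== PORT A =====
-- int(c) for a digit character c
def pvDigit (c : Char) : Int := (c.toNat : Int) - 48

-- the for-loop of A over the characters, state (answer, score, current, previous)
def solutionLoop : List Char → Int → Int → Int → Int → Int
  | [], answer, _score, _current, _previous => answer
  | c :: rest, answer, score, current, previous =>
    if '0' ≤ c ∧ c ≤ '9' then
      if c = '0' ∧ score = 1 then
        solutionLoop rest answer 10 current previous
      else
        solutionLoop rest answer (pvDigit c) current previous
    else if c = 'S' then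
      solutionLoop rest (answer + score ^ 1) score (score ^ 1) current
    else if c = 'D' then
      solutionLoop rest (answer + score ^ 2) score (score ^ 2) current
    else if c = 'T' then
      solutionLoop rest (answer + score ^ 3) score (score ^ 3) current
    else if c = '*' then
      solutionLoop rest (answer - (previous + current) + (previous * 2 + current * 2)) score
        (current * 2) (previous * 2)
    else if c = '#' then
      solutionLoop rest (answer - current + current * -1) score (current * -1) previous
    else
      solutionLoop rest answer score current previous

def solution (dartResult : String) : Int :=
  solutionLoop dartResult.toList 0 0 0 0

-- ===== PORT B =====
-- Source B's guarded in-place updates `rounds[-1] *= 2` / `rounds[-2] *= 2` / `rounds[-1] *= -1`: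
-- expressed through the reversed list (the guards `if rounds:` / `if len(rounds)>=2:` are the
-- pattern-match cases).
def pvDblFirstTwo : List Int → List Int
  | [] => []
  | [a] => [a * 2]
  | a :: b :: t => a * 2 :: b * 2 :: t

def pvNegFirst : List Int → List Int
  | [] => []
  | a :: t => a * -1 :: t

-- the for-loop of B, state (rounds, score)
def altLoop : List Char → List Int → Int → List Int
  | [], rounds, _score => rounds
  | c :: rest, rounds, score =>
    if '0' ≤ c ∧ c ≤ '9' then
      if c = '0' ∧ score = 1 then
        altLoop rest rounds 10
      else
        altLoop rest rounds (pvDigit c)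
    else if c = 'S' then
      altLoop rest (rounds ++ [score ^ 1]) score
    else if c = 'D' then
      altLoop rest (rounds ++ [score ^ 2]) score
    else if c = 'T' then
      altLoop rest (rounds ++ [score ^ 3]) score
    else if c = '*' then
      altLoop rest (pvDblFirstTwo rounds.reverse).reverse score
    else if c = '#' then
      altLoop rest (pvNegFirst rounds.reverse).reverse score
    else
      altLoop rest rounds score

def solution_alt (dartResult : String) : Int :=
  (altLoop dartResult.toList [] 0).sum

-- ===== PRECONDITION & SPEC =====
def Spec_solution (dartResult : String) (out : Int) : Prop := out = solution_alt dartResult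
instance (dartResult : String) (out : Int) : Decidable (Spec_solution dartResult out) := by unfold Spec_solution; infer_instance

-- ===== CLAIM (what is proved, stated in full; the proofs are below) =====
def Claim_equal_solution : Prop := ∀ (dartResult : String), Dom_solution dartResult → Spec_solution dartResult (solution dartResult)

-- ===== LEMMAS AND PROOFS =====

-- Invariant: A's answer is the sum of B's rounds, A's current/previous are the last/second-to-last
-- entries of B's rounds list (0 when absent).
lemma loop_eq : ∀ (cs : List Char) (score : Int) (rs : List Int),
    solutionLoop cs rs.sum score (rs.reverse.headD 0) ((rs.reverse.drop 1).headD 0)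
      = (altLoop cs rs score).sum := by
  intro cs
  induction cs with
  | nil => intro score rs; simp [solutionLoop, altLoop]
  | cons c rest ih =>
    intro score rs
    by_cases hd : '0' ≤ c ∧ c ≤ '9'
    · by_cases h0 : c = '0' ∧ score = 1
      · simp only [solutionLoop, altLoop, if_pos hd, if_pos h0]; exact ih 10 rs
      · simp only [solutionLoop, altLoop, if_pos hd, if_neg h0]; exact ih (pvDigit c) rs
    · by_cases hS : c = 'S'
      · simp only [solutionLoop, altLoop, if_neg hd, if_pos hS]
        have := ih score (rs ++ [score ^ 1])
        simpa using this
      · by_cases hD : c = 'D'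
        · simp only [solutionLoop, altLoop, if_neg hd, if_neg hS, if_pos hD]
          have := ih score (rs ++ [score ^ 2])
          simpa using this
        · by_cases hT : c = 'T'
          · simp only [solutionLoop, altLoop, if_neg hd, if_neg hS, if_neg hD, if_pos hT]
            have := ih score (rs ++ [score ^ 3])
            simpa using this
          · by_cases hM : c = '*'
            · simp only [solutionLoop, altLoop, if_neg hd, if_neg hS, if_neg hD, if_neg hT,
                if_pos hM]
              have := ih score (pvDblFirstTwo rs.reverse).reverse
              rcases hr : rs.reverse with _ | ⟨a, _ | ⟨b, t⟩⟩ <;>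
                · rw [hr] at this
                  simp only [pvDblFirstTwo] at this ⊢
                  have hsum : rs.sum = rs.reverse.sum := (List.sum_reverse rs).symm
                  rw [hr] at hsum
                  simp only [hsum]
                  simp at this ⊢
                  try rw [← this]
                  try ring_nf
            · by_cases hH : c = '#'
              · simp only [solutionLoop, altLoop, if_neg hd, if_neg hS, if_neg hD, if_neg hT,
                  if_neg hM, if_pos hH]
                have := ih score (pvNegFirst rs.reverse).reverse
                rcases hr : rs.reverse with _ | ⟨a, t⟩ <;>
                  · rw [hr] at this
                    simp only [pvNegFirst] at this ⊢
                    have hsum : rs.sum = rs.reverse.sum := (List.sum_reverse rs).symm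
                    rw [hr] at hsum
                    simp only [hsum]
                    simp at this ⊢
                    try rw [← this]
                    try ring_nf
              · simp only [solutionLoop, altLoop, if_neg hd, if_neg hS, if_neg hD, if_neg hT,
                  if_neg hM, if_neg hH]
                exact ih score rs

-- ===== VERDICT (by name: the statement is the Claim_ definition above) =====
theorem solution_spec : Claim_equal_solution := by
  intro dartResult _
  unfold Spec_solution solution solution_alt
  simpa using loop_eq dartResult.toList 0 []
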